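-- pv_equiv track=rewrite | github.com/lihaizhong/ai-agent-upgrade | .opencode/skills/prompt-learning/scripts/state.py | _get_category_for_course
-- ===== SOURCE A (Python) =====
-- from typing import Optional
--
-- def _get_category_for_course(course_num: int) -> Optional[str]:
--     """获取课程所属类别"""
--     categories = {
--         "基础": [1, 2],
--         "推理": [3, 4, 5],
--         "知识": [6, 7, 8],
--         "工具": [9, 10, 11],
--         "优化": [12, 13, 14],
--         "前沿": [15, 16, 17],
--     }
--     for cat, courses in categories.items():
--         if course_num in courses:
--             return cat
--     return None
-- ===== SOURCE B (Python) =====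
-- from typing import Optional
--
-- def _get_category_for_course(course_num: int) -> Optional[str]:
--     """获取课程所属类别"""
--     if 1 <= course_num <= 2:
--         return "基础"
--     if 3 <= course_num <= 17:
--         return ("推理", "知识", "工具", "优化", "前沿")[(course_num - 3) // 3]
--     return None
-- ===== Notes on version B (the rewrite author's own statement) =====
-- stated objective: simpler
-- what changed: Replaces the dict of category->course-number lists and the per-category membership-scan loop with closed-form range checks and floor-division arithmetic ((n-3)//3) indexing a flat tuple of category names.
import Mathlib
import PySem

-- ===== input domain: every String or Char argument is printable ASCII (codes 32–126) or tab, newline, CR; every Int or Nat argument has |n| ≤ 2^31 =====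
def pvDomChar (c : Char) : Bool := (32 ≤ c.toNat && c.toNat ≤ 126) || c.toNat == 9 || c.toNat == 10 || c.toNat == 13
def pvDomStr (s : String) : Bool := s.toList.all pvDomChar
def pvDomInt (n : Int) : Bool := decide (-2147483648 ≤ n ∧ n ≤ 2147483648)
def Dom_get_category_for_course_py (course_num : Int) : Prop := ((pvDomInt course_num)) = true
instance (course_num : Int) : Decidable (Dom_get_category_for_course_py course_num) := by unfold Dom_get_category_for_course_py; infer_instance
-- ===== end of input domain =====

-- B replaces A's dict-of-lists membership loop with closed-form range checks and
-- floor-division arithmetic indexing a flat tuple of names (objective: simpler).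

-- ===== PORT A =====
-- the for-loop over categories.items(): first category whose course list contains course_num
def pvCatLoop (course_num : Int) : List (String × List Int) → Option String
  | [] => none
  | (cat, courses) :: rest =>
      if courses.contains course_num then some cat else pvCatLoop course_num rest

def get_category_for_course_py (course_num : Int) : Option String :=
  let categories : List (String × List Int) :=
    [("基础", [1, 2]), ("推理", [3, 4, 5]), ("知识", [6, 7, 8]),
     ("工具", [9, 10, 11]), ("优化", [12, 13, 14]), ("前沿", [15, 16, 17])]
  pvCatLoop course_num categories

-- ===== PORT B =====
def get_category_for_course_py_alt (course_num : Int) : Option String :=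
  if 1 ≤ course_num ∧ course_num ≤ 2 then some "基础"
  else if 3 ≤ course_num ∧ course_num ≤ 17 then
    -- tuple indexing with an in-range index (0..4)
    PySem.List.pyGet? ["推理", "知识", "工具", "优化", "前沿"]
      (PySem.Int.floordiv (course_num - 3) 3)
  else none

-- ===== PRECONDITION & SPEC =====
def Spec_get_category_for_course_py (course_num : Int) (out : Option String) : Prop := out = get_category_for_course_py_alt course_num
instance (course_num : Int) (out : Option String) : Decidable (Spec_get_category_for_course_py course_num out) := by unfold Spec_get_category_for_course_py; infer_instance

-- ===== CLAIM (what is proved, stated in full; the proofs are below) =====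
def Claim_equal_get_category_for_course_py : Prop := ∀ (course_num : Int), Dom_get_category_for_course_py course_num → Spec_get_category_for_course_py course_num (get_category_for_course_py course_num)

-- ===== LEMMAS AND PROOFS =====

-- ===== VERDICT (by name: the statement is the Claim_ definition above) =====
theorem get_category_for_course_py_spec : Claim_equal_get_category_for_course_py := by
  intro n _
  unfold Spec_get_category_for_course_py
  by_cases h : 1 ≤ n ∧ n ≤ 17
  · obtain ⟨h1, h2⟩ := h
    interval_cases n <;> decide
  · have h1 : n < 1 ∨ 17 < n := by omega
    simp only [get_category_for_course_py, get_category_for_course_py_alt, pvCatLoop,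
      List.contains_eq_mem, List.mem_cons, List.not_mem_nil, or_false, decide_eq_true_eq]
    split_ifs with c1 c2 c3 c4 c5 c6 c7 c8 <;> first | rfl | omega
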